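-- pv_equiv track=rewrite | github.com/mark-me/temp | etl_template/src/dependencies_checker/dag_generator.py | _make_increasing_with_duplicates
-- ===== SOURCE A (Python) =====
-- def _make_increasing_with_duplicates(lst: list) -> list:
--     result = []
--     current = lst[0] if lst else 0
--
--     for i in range(len(lst)):
--         if i == 0:
--             result.append(current)
--         else:
--             if lst[i] == lst[i - 1]:
--                 # duplicaat → zelfde waarde
--                 result.append(result[-1])
--             else:
--                 # verhoog vorige met 1
--                 result.append(result[-1] + 1)
--     return result
-- ===== SOURCE B (Python) =====
-- def _make_increasing_with_duplicates(lst: list) -> list: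
--     if not lst:
--         return []
--     # run-length encode the list into maximal runs of equal values
--     runs = []
--     for x in lst:
--         if runs and runs[-1][0] == x:
--             runs[-1][1] += 1
--         else:
--             runs.append([x, 1])
--     base = lst[0]
--     out = []
--     idx = 0
--     for _value, count in runs:
--         out.extend([base + idx] * count)
--         idx += 1
--     return out
-- ===== Notes on version B (the rewrite author's own statement) =====
-- stated objective: alternative
-- what changed: B run-length-encodes the list into maximal runs and then emits base+idx repeated for each run, instead of A's per-index loop comparing each element with its predecessor and reading the last emitted value.
import Mathlib
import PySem

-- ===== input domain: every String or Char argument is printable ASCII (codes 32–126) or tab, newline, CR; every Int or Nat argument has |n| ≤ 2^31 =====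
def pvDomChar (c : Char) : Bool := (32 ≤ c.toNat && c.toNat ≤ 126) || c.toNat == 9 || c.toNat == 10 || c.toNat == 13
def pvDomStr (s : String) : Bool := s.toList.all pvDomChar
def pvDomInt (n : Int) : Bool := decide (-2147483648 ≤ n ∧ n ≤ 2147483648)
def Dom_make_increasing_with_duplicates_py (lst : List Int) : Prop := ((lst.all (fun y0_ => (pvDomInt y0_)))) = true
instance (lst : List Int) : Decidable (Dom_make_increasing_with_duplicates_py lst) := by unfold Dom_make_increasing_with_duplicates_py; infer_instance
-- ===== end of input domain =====

-- B replaces A's per-index predecessor-comparison loop by a run-length encoding expanded run by run (alternative decomposition, same cost; return value only — neither version mutates its argument).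


-- ===== PORT A =====
-- one loop step of A: i == 0 appends current, otherwise compares lst[i] with lst[i-1]
-- and appends the last result value (+1); all indices are in range, so pyGetD with default 0 is exact
def pvStepA (lst : List Int) (current : Int) (result : List Int) (i : Int) : List Int :=
  if i = 0 then result ++ [current]
  else if PySem.List.pyGetD lst i 0 = PySem.List.pyGetD lst (i - 1) 0 then
    result ++ [PySem.List.pyGetD result (-1) 0]
  else
    result ++ [PySem.List.pyGetD result (-1) 0 + 1]

def make_increasing_with_duplicates_py (lst : List Int) : List Int :=
  let current : Int := match lst with | [] => 0 | x :: _ => x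
  (PySem.List.pyRange 0 (lst.length : Int) 1).foldl (pvStepA lst current) []

-- ===== PORT B =====
-- B's first loop: run-length encoding (the in-place bump of the last count becomes replacing the last pair)
def pvRunStep (runs : List (Int × Int)) (x : Int) : List (Int × Int) :=
  match runs.getLast? with
  | some (v, c) => if v = x then runs.dropLast ++ [(v, c + 1)] else runs ++ [(x, 1)]
  | none => [(x, 1)]

-- B's second loop, structurally: emit [base + idx] * count for each run, incrementing idx
def pvExpand (base idx : Int) : List (Int × Int) → List Int
  | [] => []
  | (_, c) :: rest => List.replicate c.toNat (base + idx) ++ pvExpand base (idx + 1) rest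

def make_increasing_with_duplicates_py_alt (lst : List Int) : List Int :=
  match lst with
  | [] => []
  | x :: _ => pvExpand x 0 (lst.foldl pvRunStep [])

-- ===== PRECONDITION & SPEC =====
def Spec_make_increasing_with_duplicates_py (lst : List Int) (out : List Int) : Prop := out = make_increasing_with_duplicates_py_alt lst
instance (lst : List Int) (out : List Int) : Decidable (Spec_make_increasing_with_duplicates_py lst out) := by unfold Spec_make_increasing_with_duplicates_py; infer_instance

-- ===== CLAIM (what is proved, stated in full; the proofs are below) =====
def Claim_equal_make_increasing_with_duplicates_py : Prop := ∀ (lst : List Int), Dom_make_increasing_with_duplicates_py lst → Spec_make_increasing_with_duplicates_py lst (make_increasing_with_duplicates_py lst)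

-- ===== LEMMAS AND PROOFS =====

-- reference recursion: the value emitted for y after previous element `prev` at current output value `cur`
def pvF (prev cur : Int) : List Int → List Int
  | [] => []
  | y :: ys => (if y = prev then cur else cur + 1) :: pvF y (if y = prev then cur else cur + 1) ys

lemma pvF_snoc (prev cur y : Int) (l : List Int) :
    pvF prev cur (l ++ [y]) =
      pvF prev cur l ++
        [if y = l.getLastD prev then (pvF prev cur l).getLastD cur
         else (pvF prev cur l).getLastD cur + 1] := by
  induction l generalizing prev cur with
  | nil => simp [pvF]
  | cons a l ih => simp only [List.cons_append, pvF, ih, List.getLastD_cons]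

lemma pv_take_getLastD (x : Int) (xs : List Int) (n : Nat) (h : n < xs.length) :
    (xs.take n).getLastD x = (x :: xs).getD n 0 := by
  induction n generalizing x xs with
  | zero => cases xs <;> simp
  | succ n ih =>
    cases xs with
    | nil => simp at h
    | cons y ys =>
      rw [List.take_succ_cons, List.getLastD_cons]
      simpa using ih y ys (by simpa using h)

-- invariant of A's loop: after the iterations i = 0 … n the result is x :: pvF x x (xs.take n)
lemma pvA_loop (x : Int) (xs : List Int) (n : Nat) (h : n ≤ xs.length) :
    (PySem.List.pyRange 0 ((n : Int) + 1) 1).foldl (pvStepA (x :: xs) x) [] =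
      x :: pvF x x (xs.take n) := by
  induction n with
  | zero =>
    rw [show ((0:Nat):Int) + 1 = 0 + 1 by norm_num, PySem.List.pyRange_one_singleton]
    simp [pvStepA, pvF]
  | succ n ih =>
    have hn : n ≤ xs.length := by omega
    rw [show ((n+1:Nat):Int) + 1 = (((n:Int)+1) + 1) by push_cast; ring,
        PySem.List.pyRange_one_succ_right (by positivity), List.foldl_append,
        ih hn]
    have hxn : xs.take (n+1) = xs.take n ++ [xs.getD n 0] := by
      rw [List.take_add_one]
      congr 1
      rw [List.getD_eq_getElem?_getD]
      cases hh : xs[n]? with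
      | none => exact absurd (List.getElem?_eq_none_iff.mp hh) (by omega)
      | some v => simp
    rw [hxn, pvF_snoc]
    simp only [List.foldl_cons, List.foldl_nil, pvStepA]
    have h1 : ((n:Int) + 1) ≠ 0 := by omega
    rw [if_neg h1]
    have hget1 : PySem.List.pyGetD (x :: xs) ((n:Int)+1) 0 = xs.getD n 0 := by
      have : ((n:Int)+1) = ((n+1 : Nat) : Int) := by push_cast; ring
      rw [this, PySem.List.pyGetD_natCast]
      simp
    have hget2 : PySem.List.pyGetD (x :: xs) ((n:Int)+1-1) 0 = (x :: xs).getD n 0 := by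
      have : ((n:Int)+1-1) = ((n : Nat) : Int) := by ring
      rw [this, PySem.List.pyGetD_natCast]
    have hlast : PySem.List.pyGetD (x :: pvF x x (xs.take n)) (-1) 0
        = (pvF x x (xs.take n)).getLastD x := by
      rw [PySem.List.pyGetD_neg_one _ _ (by simp : (x :: pvF x x (xs.take n)) ≠ [])]
      cases pvF x x (xs.take n) with
      | nil => simp
      | cons a l => simp [List.getLast?_eq_some_getLast]
    rw [hget1, hget2, hlast, pv_take_getLastD x xs n (by omega)]
    split_ifs <;> simp

lemma pvA_eq (lst : List Int) :
    make_increasing_with_duplicates_py lst =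
      match lst with | [] => [] | x :: xs => x :: pvF x x xs := by
  cases lst with
  | nil => rfl
  | cons x xs =>
    have h := pvA_loop x xs xs.length (le_refl _)
    rw [List.take_length] at h
    simpa [make_increasing_with_duplicates_py, Int.natCast_succ] using h

lemma pvExpand_snoc (base idx v c : Int) (rs : List (Int × Int)) :
    pvExpand base idx (rs ++ [(v, c)]) =
      pvExpand base idx rs ++ List.replicate c.toNat (base + idx + rs.length) := by
  induction rs generalizing idx with
  | nil => simp [pvExpand]
  | cons p rs ih =>
    cases p with
    | mk v' c' =>
      simp only [List.cons_append, pvExpand, ih, List.length_cons, List.append_assoc]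
      congr 3
      push_cast
      ring

-- invariant of B: the runs of x :: l are nonempty, their last run carries the last element
-- with a positive count, their expansion is x :: pvF x x l, and the current output value is
-- x + (number of runs) - 1
lemma pvB_inv (x : Int) (l : List Int) :
    ∃ v c : Int, ((x :: l).foldl pvRunStep []).getLast? = some (v, c) ∧
      1 ≤ c ∧ v = l.getLastD x ∧
      pvExpand x 0 ((x :: l).foldl pvRunStep []) = x :: pvF x x l ∧
      (pvF x x l).getLastD x = x + (((x :: l).foldl pvRunStep []).length : Int) - 1 := by
  induction l using List.reverseRecOn with
  | nil =>
    refine ⟨x, 1, ?_⟩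
    simp [pvRunStep, pvExpand, pvF]
  | append_singleton l y ih =>
    obtain ⟨v, c, hgl, hc, hv, he, hl⟩ := ih
    have hfold : (x :: (l ++ [y])).foldl pvRunStep []
        = pvRunStep ((x :: l).foldl pvRunStep []) y := by
      simp [List.foldl_append]
    set r := (x :: l).foldl pvRunStep [] with hr
    have hne : r ≠ [] := by
      intro hnil; rw [hnil] at hgl; simp at hgl
    have hrsplit : r.dropLast ++ [(v, c)] = r := by
      simpa [hgl] using List.dropLast_append_getLast? (v, c) hgl
    have hdlen : (r.dropLast.length : Int) = (r.length : Int) - 1 := by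
      have := List.length_pos_iff.mpr hne
      simp [List.length_dropLast]
      omega
    by_cases hy : v = y
    · have hstep : pvRunStep r y = r.dropLast ++ [(v, c + 1)] := by
        unfold pvRunStep
        rw [hgl]
        simp [hy]
      have hexp : pvExpand x 0 r
          = pvExpand x 0 r.dropLast ++ List.replicate c.toNat (x + 0 + r.dropLast.length) := by
        conv_lhs => rw [← hrsplit]
        rw [pvExpand_snoc]
      refine ⟨v, c + 1, ?_, by omega, ?_, ?_, ?_⟩
      · simp [hfold, hstep]
      · simp [← hy, hv]
      · rw [hfold, hstep, pvExpand_snoc, pvF_snoc, ← hv, if_pos hy.symm, hl]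
        have hrep : (c + 1).toNat = c.toNat + 1 := by omega
        rw [hrep, List.replicate_succ', ← List.append_assoc, ← hexp, he]
        rw [hdlen]
        simp
        ring_nf
      · rw [hfold, hstep, pvF_snoc, ← hv, if_pos hy.symm]
        simp only [List.getLastD_concat, List.length_append, List.length_cons,
          List.length_nil]
        rw [hl]
        push_cast
        omega
    · have hstep : pvRunStep r y = r ++ [(y, 1)] := by
        unfold pvRunStep
        rw [hgl]
        simp [hy]
      refine ⟨y, 1, ?_, le_refl 1, ?_, ?_, ?_⟩
      · simp [hfold, hstep]
      · simp
      · rw [hfold, hstep, pvExpand_snoc, pvF_snoc, ← hv,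
          if_neg (by exact fun hh => hy hh.symm), he, hl]
        simp
      · rw [hfold, hstep, pvF_snoc, ← hv, if_neg (by exact fun hh => hy hh.symm)]
        simp only [List.getLastD_concat, List.length_append, List.length_cons,
          List.length_nil]
        rw [hl]
        push_cast
        ring

lemma pvB_eq (lst : List Int) :
    make_increasing_with_duplicates_py_alt lst =
      match lst with | [] => [] | x :: xs => x :: pvF x x xs := by
  cases lst with
  | nil => rfl
  | cons x xs =>
    obtain ⟨v, c, _, _, _, he, _⟩ := pvB_inv x xs
    simpa [make_increasing_with_duplicates_py_alt] using he

-- ===== VERDICT (by name: the statement is the Claim_ definition above) =====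
theorem make_increasing_with_duplicates_py_spec : Claim_equal_make_increasing_with_duplicates_py := by
  intro lst _
  unfold Spec_make_increasing_with_duplicates_py
  rw [pvA_eq, pvB_eq]
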